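-- pv_equiv track=rewrite | github.com/coding-test-practice/kimtaewon-python | 1/section2/10/10.py | calc
-- ===== SOURCE A (Python) =====
-- def calc(data):
--     score = 0
--     # Todo: 연속 콤보 있음
--     combo = False
--     cnt = 0
--     for d in data:
--         if d == 1:
--             if combo:
--                 score += 1 + cnt
--             else:
--                 score += 1
--             combo = True
--             cnt += 1
--         else:
--             combo = False
--             cnt = 0
--     return score
-- ===== SOURCE B (Python) =====
-- def calc(data):
--     total = 0
--     run = 0
--     for d in data:
--         if d == 1:
--             run += 1
--         else:
--             total += run * (run + 1) // 2
--             run = 0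
--     return total + run * (run + 1) // 2
-- ===== Notes on version B (the rewrite author's own statement) =====
-- stated objective: simpler
-- what changed: Replaces the score/combo/cnt state machine with a run-length scan that adds the triangular-number closed form L*(L+1)//2 once per maximal run of 1s.
import Mathlib
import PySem

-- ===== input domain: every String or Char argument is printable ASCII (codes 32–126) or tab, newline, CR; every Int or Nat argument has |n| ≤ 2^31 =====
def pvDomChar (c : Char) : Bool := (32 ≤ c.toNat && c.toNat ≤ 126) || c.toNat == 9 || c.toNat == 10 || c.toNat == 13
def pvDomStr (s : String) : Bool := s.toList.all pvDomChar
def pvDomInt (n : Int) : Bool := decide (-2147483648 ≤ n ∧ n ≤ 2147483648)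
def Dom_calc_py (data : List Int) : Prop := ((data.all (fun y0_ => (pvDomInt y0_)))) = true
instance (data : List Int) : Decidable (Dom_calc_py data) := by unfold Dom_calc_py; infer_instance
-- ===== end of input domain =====

-- B replaces A's incremental score/combo/cnt state machine with a run-length scan
-- adding the triangular closed form L*(L+1)//2 per maximal run of 1s (objective: simpler).


-- ===== PORT A =====
-- state = (score, combo, cnt), exactly A's loop body
def calcStepA (st : Int × Bool × Int) (d : Int) : Int × Bool × Int :=
  if d = 1 then
    ((if st.2.1 then st.1 + 1 + st.2.2 else st.1 + 1), true, st.2.2 + 1)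
  else
    (st.1, false, 0)

def calc_py (data : List Int) : Int :=
  (data.foldl calcStepA (0, false, 0)).1

-- ===== PORT B =====
-- state = (total, run); a finished run of length r contributes r*(r+1)//2
def calcStepB (st : Int × Int) (d : Int) : Int × Int :=
  if d = 1 then (st.1, st.2 + 1)
  else (st.1 + PySem.Int.floordiv (st.2 * (st.2 + 1)) 2, 0)

def calc_py_alt (data : List Int) : Int :=
  let st := data.foldl calcStepB (0, 0)
  st.1 + PySem.Int.floordiv (st.2 * (st.2 + 1)) 2

-- ===== PRECONDITION & SPEC =====
def Spec_calc_py (data : List Int) (out : Int) : Prop := out = calc_py_alt data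
instance (data : List Int) (out : Int) : Decidable (Spec_calc_py data out) := by unfold Spec_calc_py; infer_instance

-- ===== CLAIM (what is proved, stated in full; the proofs are below) =====
def Claim_equal_calc_py : Prop := ∀ (data : List Int), Dom_calc_py data → Spec_calc_py data (calc_py data)

-- ===== LEMMAS AND PROOFS =====
def calcTri (r : Int) : Int := PySem.Int.floordiv (r * (r + 1)) 2

theorem calcTri_zero : calcTri 0 = 0 := by decide

theorem calcTri_succ (r : Int) : calcTri r + (r + 1) = calcTri (r + 1) := by
  unfold calcTri
  rw [PySem.Int.floordiv_eq_ediv_of_pos (by omega), PySem.Int.floordiv_eq_ediv_of_pos (by omega)]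
  have h : (r + 1) * (r + 1 + 1) = r * (r + 1) + 2 * (r + 1) := by ring
  rw [h]; omega

theorem calc_loop_eq (ds : List Int) (t r : Int) (hr : 0 ≤ r) :
    (ds.foldl calcStepA (t + calcTri r, decide (0 < r), r)).1
      = (ds.foldl calcStepB (t, r)).1 + calcTri (ds.foldl calcStepB (t, r)).2 := by
  induction ds generalizing t r with
  | nil => simp
  | cons d ds ih =>
    simp only [List.foldl_cons, calcStepA, calcStepB]
    by_cases hd : d = 1
    · simp only [hd]
      have hadd : (if decide (0 < r) = true then t + calcTri r + 1 + r else t + calcTri r + 1)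
          = t + calcTri (r + 1) := by
        by_cases h0 : 0 < r
        · simp only [h0, decide_true, if_true]
          have := calcTri_succ r; omega
        · have h0' : r = 0 := by omega
          simp [h0', calcTri_zero]
          decide
      rw [hadd]
      have hd1 : decide (0 < r + 1) = true := by simp; omega
      have := ih t (r + 1) (by omega)
      rw [hd1] at this
      exact this
    · simp only [if_neg hd]
      have := ih (t + calcTri r) 0 le_rfl
      simpa [calcTri_zero, calcTri] using this

-- ===== VERDICT (by name: the statement is the Claim_ definition above) =====
theorem calc_py_spec : Claim_equal_calc_py := by
  intro data _
  unfold Spec_calc_py calc_py calc_py_alt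
  have := calc_loop_eq data 0 0 le_rfl
  simpa [calcTri_zero, calcTri] using this
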